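-- pv_equiv track=rewrite | github.com/Santoshkumaratter/-Job-Scraper-Dashboard | scraper/scrapers/jobsora.py | _infer_market
-- ===== SOURCE A (Python) =====
-- def _infer_market(location: str) -> str:
--     """Infer market from location"""
--     if not location:
--         return 'USA'
--     location_upper = location.upper()
--     if 'UK' in location_upper or 'UNITED KINGDOM' in location_upper or 'LONDON' in location_upper:
--         return 'UK'
--     elif 'USA' in location_upper or 'UNITED STATES' in location_upper or any(state in location_upper for state in ['NY', 'CA', 'TX', 'FL']):
--         return 'USA'
--     return 'OTHER'
-- ===== SOURCE B (Python) =====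
-- _UK_KEYS = ('UK', 'UNITED KINGDOM', 'LONDON')
-- _USA_KEYS = ('USA', 'UNITED STATES', 'NY', 'CA', 'TX', 'FL')
--
--
-- def _infer_market(location: str) -> str:
--     """Infer market from location: a single left-to-right scan of the uppercased
--     string, accumulating which keyword groups start at some position, then one
--     final priority decision (UK > USA > OTHER)."""
--     if not location:
--         return 'USA'
--     up = location.upper()
--     uk = usa = False
--     for i in range(len(up)):
--         uk = uk or any(up.startswith(k, i) for k in _UK_KEYS)
--         usa = usa or any(up.startswith(k, i) for k in _USA_KEYS)
--     return 'UK' if uk else ('USA' if usa else 'OTHER')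
-- ===== Notes on version B (the rewrite author's own statement) =====
-- stated objective: alternative
-- what changed: Instead of A's six independent early-return substring searches over the whole string, B makes one left-to-right scan over the uppercased string, at each position testing via str.startswith which keyword groups begin there and accumulating two boolean flags, then decides UK/USA/OTHER once at the end by priority.
import Mathlib
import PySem

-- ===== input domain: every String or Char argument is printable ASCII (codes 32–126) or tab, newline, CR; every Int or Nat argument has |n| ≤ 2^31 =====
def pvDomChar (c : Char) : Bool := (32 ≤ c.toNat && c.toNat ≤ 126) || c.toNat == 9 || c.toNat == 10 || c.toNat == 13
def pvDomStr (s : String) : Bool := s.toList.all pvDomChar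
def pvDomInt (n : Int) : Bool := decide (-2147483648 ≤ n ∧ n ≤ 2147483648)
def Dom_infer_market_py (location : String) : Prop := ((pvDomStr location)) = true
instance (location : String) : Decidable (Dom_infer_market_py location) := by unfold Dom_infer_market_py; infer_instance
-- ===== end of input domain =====

-- B replaces A's chain of independent substring searches with a single positional scan accumulating match flags, decided once by priority at the end (alternative decomposition, same cost).


-- ===== PORT A =====
def infer_market_py (location : String) : String :=
  if location = "" then "USA"
  else
    let location_upper := PySem.Str.upper location
    if PySem.Str.isIn "UK" location_upper || PySem.Str.isIn "UNITED KINGDOM" location_upper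
        || PySem.Str.isIn "LONDON" location_upper then "UK"
    else if PySem.Str.isIn "USA" location_upper || PySem.Str.isIn "UNITED STATES" location_upper
        || (["NY", "CA", "TX", "FL"].any (fun state => PySem.Str.isIn state location_upper)) then "USA"
    else "OTHER"

-- ===== PORT B =====
def ukKeys : List String := ["UK", "UNITED KINGDOM", "LONDON"]
def usaKeys : List String := ["USA", "UNITED STATES", "NY", "CA", "TX", "FL"]

-- up.startswith(k, i) with 0 ≤ i ≤ len(up) is exactly the prefix test on up.drop i (exact for these bounds).
def infer_market_py_alt (location : String) : String :=
  if location = "" then "USA"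
  else
    let up := (PySem.Str.upper location).toList
    let flags := (List.range up.length).foldl
      (fun (st : Bool × Bool) i =>
        (st.1 || ukKeys.any (fun k => PySem.Chars.startswith (up.drop i) k.toList),
         st.2 || usaKeys.any (fun k => PySem.Chars.startswith (up.drop i) k.toList)))
      (false, false)
    if flags.1 then "UK" else if flags.2 then "USA" else "OTHER"

-- ===== PRECONDITION & SPEC =====
def Spec_infer_market_py (location : String) (out : String) : Prop := out = infer_market_py_alt location
instance (location : String) (out : String) : Decidable (Spec_infer_market_py location out) := by unfold Spec_infer_market_py; infer_instance

-- ===== CLAIM (what is proved, stated in full; the proofs are below) =====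
def Claim_equal_infer_market_py : Prop := ∀ (location : String), Dom_infer_market_py location → Spec_infer_market_py location (infer_market_py location)

-- ===== LEMMAS AND PROOFS =====

-- The or-accumulating pair fold computes the two List.any's.
theorem pv_fold_pair (f g : Nat → Bool) (n : Nat) (a b : Bool) :
    (List.range n).foldl
      (fun (st : Bool × Bool) i => (st.1 || f i, st.2 || g i)) (a, b)
      = (a || (List.range n).any f, b || (List.range n).any g) := by
  induction n generalizing a b with
  | zero => simp
  | succ m ih =>
    rw [List.range_succ, List.foldl_append, ih]
    simp [Bool.or_assoc]

-- A keyword starting at some position of s is exactly a substring occurrence (for nonempty keywords).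
theorem pv_scan_eq_isIn (s k : List Char) (hk : k ≠ []) :
    (List.range s.length).any (fun i => PySem.Chars.startswith (s.drop i) k)
      = PySem.Chars.isIn k s := by
  rcases h : PySem.Chars.isIn k s with _ | _
  · rw [PySem.Chars.isIn_eq_false_iff] at h
    simp only [List.any_eq_false, List.mem_range]
    intro i _
    rw [Bool.not_eq_true, ← Bool.not_eq_true, PySem.Chars.startswith_iff]
    intro hp
    exact h (hp.isInfix.trans (List.drop_suffix i s).isInfix)
  · obtain ⟨j, hj⟩ := (PySem.Chars.exists_prefix_drop_iff_isIn k s).2 h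
    have hjlt : j < s.length := by
      by_contra hge
      rw [List.drop_eq_nil_of_le (le_of_not_gt hge)] at hj
      exact hk (List.prefix_nil.mp hj)
    simp only [List.any_eq_true, List.mem_range]
    exact ⟨j, hjlt, (PySem.Chars.startswith_iff _ _).2 hj⟩

theorem pv_any_or (l : List Nat) (P Q : Nat → Bool) :
    l.any (fun i => P i || Q i) = (l.any P || l.any Q) := by
  induction l with
  | nil => simp
  | cons a l ih => cases hP : P a <;> cases hQ : Q a <;> simp [hP, hQ, ih]

-- ===== VERDICT (by name: the statement is the Claim_ definition above) =====
theorem infer_market_py_spec : Claim_equal_infer_market_py := by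
  intro location _
  unfold Spec_infer_market_py infer_market_py infer_market_py_alt ukKeys usaKeys
  by_cases h : location = ""
  · simp [h]
  · simp only [h, if_false]
    set up := (PySem.Str.upper location).toList with hup
    rw [pv_fold_pair
      (fun i => (["UK", "UNITED KINGDOM", "LONDON"] : List String).any
        (fun k => PySem.Chars.startswith (up.drop i) k.toList))
      (fun i => (["USA", "UNITED STATES", "NY", "CA", "TX", "FL"] : List String).any
        (fun k => PySem.Chars.startswith (up.drop i) k.toList))]
    simp only [List.any_cons, List.any_nil, Bool.or_false, Bool.false_or]
    rw [pv_any_or, pv_any_or, pv_any_or, pv_any_or, pv_any_or, pv_any_or, pv_any_or]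
    rw [pv_scan_eq_isIn up "UK".toList (by decide),
        pv_scan_eq_isIn up "UNITED KINGDOM".toList (by decide),
        pv_scan_eq_isIn up "LONDON".toList (by decide),
        pv_scan_eq_isIn up "USA".toList (by decide),
        pv_scan_eq_isIn up "UNITED STATES".toList (by decide),
        pv_scan_eq_isIn up "NY".toList (by decide),
        pv_scan_eq_isIn up "CA".toList (by decide),
        pv_scan_eq_isIn up "TX".toList (by decide),
        pv_scan_eq_isIn up "FL".toList (by decide)]
    simp [PySem.Str.isIn_eq, hup, Bool.or_assoc]
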